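-- pv_equiv track=rewrite | github.com/alexlm78/AoC | 2024/Day10/solve_day10.py | sum_trailhead_ratings
-- ===== SOURCE A (Python) =====
-- from functools import lru_cache
--
-- def trailhead_rating(grid: list[list[int]], start_r: int, start_c: int) -> int:
--     """
--     Compute the Part 2 rating (number of distinct trails) for a trailhead.
--     Uses memoized DFS that counts all paths that increase by +1 up to height 9.
--     Args:
--         grid: Height map
--         start_r, start_c: Trailhead coordinates (must be height 0)
--     Returns:
--         Number of distinct increasing paths ending at any height-9 cell
--     """
--     rows, cols = len(grid), len(grid[0])
--
--     @lru_cache(maxsize=None)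
--     def count_paths(r: int, c: int) -> int:
--         """
--         Recursively count paths from (r, c) to any cell of height 9,
--         stepping only to neighbors with height +1. Memoized by (r, c).
--         """
--         h = grid[r][c]
--         if h == 9:
--             return 1
--         nh = h + 1
--         total = 0
--         if r > 0 and grid[r - 1][c] == nh:
--             total += count_paths(r - 1, c)
--         if r + 1 < rows and grid[r + 1][c] == nh:
--             total += count_paths(r + 1, c)
--         if c > 0 and grid[r][c - 1] == nh:
--             total += count_paths(r, c - 1)
--         if c + 1 < cols and grid[r][c + 1] == nh:
--             total += count_paths(r, c + 1)
--         return total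
--
--     return count_paths(start_r, start_c)
--
-- def sum_trailhead_ratings(grid: list[list[int]]) -> int:
--     """
--     Sum Part 2 ratings across all trailheads (height 0 cells).
--     Args:
--         grid: Height map
--     Returns:
--         Total rating across trailheads
--     """
--     total = 0
--     rows, cols = len(grid), len(grid[0])
--     for r in range(rows):
--         for c in range(cols):
--             if grid[r][c] == 0:
--                 total += trailhead_rating(grid, r, c)
--     return total
-- ===== SOURCE B (Python) =====
-- def _cell(grid, ways, rows, cols, h, r, c):
--     """New table value at (r, c) for the stage of height h."""
--     if grid[r][c] != h:
--         return ways[r][c]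
--     if h == 9:
--         return 1
--     nh = h + 1
--     t = 0
--     if r > 0 and grid[r - 1][c] == nh:
--         t += ways[r - 1][c]
--     if r + 1 < rows and grid[r + 1][c] == nh:
--         t += ways[r + 1][c]
--     if c > 0 and grid[r][c - 1] == nh:
--         t += ways[r][c - 1]
--     if c + 1 < cols and grid[r][c + 1] == nh:
--         t += ways[r][c + 1]
--     return t
--
-- def sum_trailhead_ratings(grid: list[list[int]]) -> int:
--     # Bottom-up DP over the whole grid: one shared table of path counts to any 9,
--     # filled height 9 down to 0, then summed at the height-0 cells.
--     rows, cols = len(grid), len(grid[0])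
--     ways = [[0] * cols for _ in range(rows)]
--     for h in range(9, -1, -1):
--         ways = [[_cell(grid, ways, rows, cols, h, r, c) for c in range(cols)]
--                 for r in range(rows)]
--     total = 0
--     for r in range(rows):
--         for c in range(cols):
--             if grid[r][c] == 0:
--                 total += ways[r][c]
--     return total
-- ===== Notes on version B (the rewrite author's own statement) =====
-- stated objective: alternative
-- what changed: Replaces the per-trailhead memoized DFS (restarted from every height-0 cell) with a single bottom-up DP over the whole grid that fills one shared paths-to-9 table by height 9 down to 0 and then sums it at the height-0 cells.
import Mathlib
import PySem

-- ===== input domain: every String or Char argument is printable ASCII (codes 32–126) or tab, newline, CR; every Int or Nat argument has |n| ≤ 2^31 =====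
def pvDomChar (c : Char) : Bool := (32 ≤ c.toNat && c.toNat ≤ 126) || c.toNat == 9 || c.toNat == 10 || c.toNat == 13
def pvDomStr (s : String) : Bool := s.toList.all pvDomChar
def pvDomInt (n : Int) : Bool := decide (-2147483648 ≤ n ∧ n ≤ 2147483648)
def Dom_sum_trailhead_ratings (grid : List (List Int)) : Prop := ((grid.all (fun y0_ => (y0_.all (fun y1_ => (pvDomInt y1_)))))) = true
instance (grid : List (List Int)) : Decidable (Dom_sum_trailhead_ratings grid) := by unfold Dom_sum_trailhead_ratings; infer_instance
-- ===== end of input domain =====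

-- B replaces A's per-trailhead memoized DFS by ONE bottom-up DP table over the whole grid,
-- filled for heights 9 down to 0 and then summed at the height-0 cells.

-- ===== PORT A =====
-- grid[r][c]; exact under Pre_ (every access either loop-bounded or guard-bounded, rows long enough)
def pvGv (g : List (List Int)) (r c : Int) : Int :=
  PySem.List.pyGetD (PySem.List.pyGetD g r []) c 0

-- count_paths of A; fuel is a transliteration device: calls start at height-0 cells and each
-- recursive call is at height +1, ending at 9, so depth ≤ 10 and fuel 10 is never exhausted on Pre_.
def pvCount (g : List (List Int)) (rows cols : Int) : Nat → Int → Int → Int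
  | 0, _, _ => 0
  | f+1, r, c =>
    let h := pvGv g r c
    if h = 9 then 1
    else
      (if 0 < r ∧ pvGv g (r-1) c = h+1 then pvCount g rows cols f (r-1) c else 0) +
      (if r+1 < rows ∧ pvGv g (r+1) c = h+1 then pvCount g rows cols f (r+1) c else 0) +
      (if 0 < c ∧ pvGv g r (c-1) = h+1 then pvCount g rows cols f r (c-1) else 0) +
      (if c+1 < cols ∧ pvGv g r (c+1) = h+1 then pvCount g rows cols f r (c+1) else 0)

def sum_trailhead_ratings (grid : List (List Int)) : Int :=
  let rows : Int := grid.length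
  let cols : Int := (PySem.List.pyGetD grid 0 []).length
  (PySem.List.pyRange 0 rows 1).foldl (fun tot r =>
    (PySem.List.pyRange 0 cols 1).foldl (fun tot c =>
      if pvGv grid r c = 0 then tot + pvCount grid rows cols 10 r c else tot) tot) 0

-- ===== PORT B =====
-- _cell of Source B
def pvCell (g w : List (List Int)) (rows cols h r c : Int) : Int :=
  if pvGv g r c ≠ h then pvGv w r c
  else if h = 9 then 1
  else
    let nh := h + 1
    let t0 : Int := 0
    let t1 := if 0 < r ∧ pvGv g (r-1) c = nh then t0 + pvGv w (r-1) c else t0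
    let t2 := if r+1 < rows ∧ pvGv g (r+1) c = nh then t1 + pvGv w (r+1) c else t1
    let t3 := if 0 < c ∧ pvGv g r (c-1) = nh then t2 + pvGv w r (c-1) else t2
    if c+1 < cols ∧ pvGv g r (c+1) = nh then t3 + pvGv w r (c+1) else t3

-- one stage of the DP: the double comprehension rebuilding the table for height h
def pvStage (g : List (List Int)) (rows cols : Int) (w : List (List Int)) (h : Int) : List (List Int) :=
  (PySem.List.pyRange 0 rows 1).map (fun r =>
    (PySem.List.pyRange 0 cols 1).map (fun c => pvCell g w rows cols h r c))

def sum_trailhead_ratings_alt (grid : List (List Int)) : Int :=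
  let rows : Int := grid.length
  let cols : Int := (PySem.List.pyGetD grid 0 []).length
  let init := List.replicate grid.length (List.replicate (PySem.List.pyGetD grid 0 []).length (0:Int))
  let w := (PySem.List.pyRange 9 (-1) (-1)).foldl (pvStage grid rows cols) init
  (PySem.List.pyRange 0 rows 1).foldl (fun tot r =>
    (PySem.List.pyRange 0 cols 1).foldl (fun tot c =>
      if pvGv grid r c = 0 then tot + pvGv w r c else tot) tot) 0

-- ===== PRECONDITION & SPEC =====
-- A raises IndexError on the empty grid (grid[0]) and whenever some row is shorter than row 0
-- (the loops index every row at columns 0..len(grid[0])-1); Pre_ excludes exactly those inputs.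
def Pre_sum_trailhead_ratings (grid : List (List Int)) : Prop :=
  grid ≠ [] ∧ ∀ row ∈ grid, (PySem.List.pyGetD grid 0 []).length ≤ row.length
instance (grid : List (List Int)) : Decidable (Pre_sum_trailhead_ratings grid) := by
  unfold Pre_sum_trailhead_ratings; infer_instance

def pvWitness_sum_trailhead_ratings : List (List Int) := [[0, 1, 2], [1, 2, 3], [8, 9, 4], [7, 6, 5]]

def Spec_sum_trailhead_ratings (grid : List (List Int)) (out : Int) : Prop := out = sum_trailhead_ratings_alt grid
instance (grid : List (List Int)) (out : Int) : Decidable (Spec_sum_trailhead_ratings grid out) := by unfold Spec_sum_trailhead_ratings; infer_instance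

-- ===== CLAIM (what is proved, stated in full; the proofs are below) =====
def Claim_equal_sum_trailhead_ratings : Prop := ∀ (grid : List (List Int)), Dom_sum_trailhead_ratings grid → Pre_sum_trailhead_ratings grid → Spec_sum_trailhead_ratings grid (sum_trailhead_ratings grid)

-- ===== LEMMAS AND PROOFS =====

-- invariant after the stages for heights 9 down to h have run
def pvInv (g : List (List Int)) (rows cols h : Int) (w : List (List Int)) : Prop :=
  ∀ r c : Int, 0 ≤ r → r < rows → 0 ≤ c → c < cols →
    pvGv w r c = if h ≤ pvGv g r c ∧ pvGv g r c ≤ 9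
                 then pvCount g rows cols (10 - pvGv g r c).toNat r c else 0

lemma pvGv_stage (g : List (List Int)) (rows cols : Int) (w : List (List Int)) (h r c : Int)
    (hr0 : 0 ≤ r) (hr : r < rows) (hc0 : 0 ≤ c) (hc : c < cols) :
    pvGv (pvStage g rows cols w h) r c = pvCell g w rows cols h r c := by
  unfold pvGv pvStage
  rw [PySem.List.pyGetD_map_pyRange_of_nonneg _ rows r _ hr0 hr,
      PySem.List.pyGetD_map_pyRange_of_nonneg _ cols c _ hc0 hc]

lemma pvCount_succ (g : List (List Int)) (rows cols : Int) (f : Nat) (r c : Int) :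
    pvCount g rows cols (f+1) r c =
      if pvGv g r c = 9 then 1 else
        (if 0 < r ∧ pvGv g (r-1) c = pvGv g r c + 1 then pvCount g rows cols f (r-1) c else 0) +
        (if r+1 < rows ∧ pvGv g (r+1) c = pvGv g r c + 1 then pvCount g rows cols f (r+1) c else 0) +
        (if 0 < c ∧ pvGv g r (c-1) = pvGv g r c + 1 then pvCount g rows cols f r (c-1) else 0) +
        (if c+1 < cols ∧ pvGv g r (c+1) = pvGv g r c + 1 then pvCount g rows cols f r (c+1) else 0) := rfl

lemma pvInv_init (g : List (List Int)) (rows cols : Int)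
    (hR : rows = (g.length : Int)) (hC : cols = ((PySem.List.pyGetD g 0 []).length : Int)) :
    pvInv g rows cols 10 (List.replicate g.length (List.replicate (PySem.List.pyGetD g 0 []).length (0:Int))) := by
  intro r c hr0 hr hc0 hc
  have h1 : pvGv (List.replicate g.length (List.replicate (PySem.List.pyGetD g 0 []).length (0:Int))) r c = 0 := by
    unfold pvGv
    rw [PySem.List.pyGetD_eq_getElem _ _ hr0 (by simpa using hR ▸ hr)]
    simp only [List.getElem_replicate]
    rw [PySem.List.pyGetD_eq_getElem _ _ hc0 (by simpa using hC ▸ hc)]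
    simp
  rw [h1]
  have : ¬ ((10:Int) ≤ pvGv g r c ∧ pvGv g r c ≤ 9) := by omega
  simp [this]

lemma pvInv_stage (g : List (List Int)) (rows cols h : Int) (w : List (List Int))
    (h0 : 0 ≤ h) (h9 : h ≤ 9) (ih : pvInv g rows cols (h+1) w) :
    pvInv g rows cols h (pvStage g rows cols w h) := by
  intro r c hr0 hr hc0 hc
  rw [pvGv_stage g rows cols w h r c hr0 hr hc0 hc]
  unfold pvCell
  by_cases hvh : pvGv g r c = h
  · rw [if_neg (by simp [hvh])]
    by_cases h9' : h = 9
    · rw [if_pos h9', if_pos (by omega)]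
      have hfu : ((10:Int) - pvGv g r c).toNat = 0 + 1 := by omega
      rw [hfu, pvCount_succ, if_pos (by omega)]
    · rw [if_neg h9']
      have hfu : ((10:Int) - pvGv g r c).toNat = ((9:Int) - h).toNat + 1 := by omega
      rw [hfu]
      conv_rhs => rw [if_pos (show h ≤ pvGv g r c ∧ pvGv g r c ≤ 9 from by omega), pvCount_succ,
        if_neg (show ¬ pvGv g r c = 9 from by omega)]
      simp only [hvh]
      have hnb : ∀ r' c', 0 ≤ r' → r' < rows → 0 ≤ c' → c' < cols → pvGv g r' c' = h + 1 →
          pvGv w r' c' = pvCount g rows cols ((9:Int) - h).toNat r' c' := by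
        intro r' c' a b d e hv
        rw [ih r' c' a b d e, hv, if_pos (by constructor <;> omega)]
        congr 1
        omega
      have e1 : ∀ acc : Int, (if 0 < r ∧ pvGv g (r-1) c = h + 1 then acc + pvGv w (r-1) c else acc)
          = acc + (if 0 < r ∧ pvGv g (r-1) c = h + 1 then pvCount g rows cols ((9:Int) - h).toNat (r-1) c else 0) := by
        intro acc
        by_cases g1 : 0 < r ∧ pvGv g (r-1) c = h + 1
        · rw [if_pos g1, if_pos g1, hnb (r-1) c (by omega) (by omega) hc0 hc g1.2]
        · rw [if_neg g1, if_neg g1]; ring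
      have e2 : ∀ acc : Int, (if r+1 < rows ∧ pvGv g (r+1) c = h + 1 then acc + pvGv w (r+1) c else acc)
          = acc + (if r+1 < rows ∧ pvGv g (r+1) c = h + 1 then pvCount g rows cols ((9:Int) - h).toNat (r+1) c else 0) := by
        intro acc
        by_cases g2 : r+1 < rows ∧ pvGv g (r+1) c = h + 1
        · rw [if_pos g2, if_pos g2, hnb (r+1) c (by omega) (by omega) hc0 hc g2.2]
        · rw [if_neg g2, if_neg g2]; ring
      have e3 : ∀ acc : Int, (if 0 < c ∧ pvGv g r (c-1) = h + 1 then acc + pvGv w r (c-1) else acc)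
          = acc + (if 0 < c ∧ pvGv g r (c-1) = h + 1 then pvCount g rows cols ((9:Int) - h).toNat r (c-1) else 0) := by
        intro acc
        by_cases g3 : 0 < c ∧ pvGv g r (c-1) = h + 1
        · rw [if_pos g3, if_pos g3, hnb r (c-1) hr0 hr (by omega) (by omega) g3.2]
        · rw [if_neg g3, if_neg g3]; ring
      have e4 : ∀ acc : Int, (if c+1 < cols ∧ pvGv g r (c+1) = h + 1 then acc + pvGv w r (c+1) else acc)
          = acc + (if c+1 < cols ∧ pvGv g r (c+1) = h + 1 then pvCount g rows cols ((9:Int) - h).toNat r (c+1) else 0) := by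
        intro acc
        by_cases g4 : c+1 < cols ∧ pvGv g r (c+1) = h + 1
        · rw [if_pos g4, if_pos g4, hnb r (c+1) hr0 hr (by omega) (by omega) g4.2]
        · rw [if_neg g4, if_neg g4]; ring
      rw [e1, e2, e3, e4]
      omega
  · rw [if_pos (by simpa using hvh)]
    rw [ih r c hr0 hr hc0 hc]
    have heq : ((h+1 ≤ pvGv g r c ∧ pvGv g r c ≤ 9)) ↔ ((h ≤ pvGv g r c ∧ pvGv g r c ≤ 9)) := by
      constructor <;> (intro p; exact ⟨by omega, p.2⟩)
    split_ifs with p q q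
    · rfl
    · exact absurd (heq.mp p) q
    · exact absurd (heq.mpr q) p
    · rfl

lemma pvInv_final (g : List (List Int)) (rows cols : Int)
    (hR : rows = (g.length : Int)) (hC : cols = ((PySem.List.pyGetD g 0 []).length : Int)) :
    pvInv g rows cols 0
      ((PySem.List.pyRange 9 (-1) (-1)).foldl (pvStage g rows cols)
        (List.replicate g.length (List.replicate (PySem.List.pyGetD g 0 []).length (0:Int)))) := by
  have hrange : PySem.List.pyRange 9 (-1) (-1) = [9,8,7,6,5,4,3,2,1,0] := by decide
  rw [hrange]
  simp only [List.foldl]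
  have i10 := pvInv_init g rows cols hR hC
  have i9 := pvInv_stage g rows cols 9 _ (by omega) (by omega) (by exact_mod_cast i10)
  have i8 := pvInv_stage g rows cols 8 _ (by omega) (by omega) (by exact_mod_cast i9)
  have i7 := pvInv_stage g rows cols 7 _ (by omega) (by omega) (by exact_mod_cast i8)
  have i6 := pvInv_stage g rows cols 6 _ (by omega) (by omega) (by exact_mod_cast i7)
  have i5 := pvInv_stage g rows cols 5 _ (by omega) (by omega) (by exact_mod_cast i6)
  have i4 := pvInv_stage g rows cols 4 _ (by omega) (by omega) (by exact_mod_cast i5)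
  have i3 := pvInv_stage g rows cols 3 _ (by omega) (by omega) (by exact_mod_cast i4)
  have i2 := pvInv_stage g rows cols 2 _ (by omega) (by omega) (by exact_mod_cast i3)
  have i1 := pvInv_stage g rows cols 1 _ (by omega) (by omega) (by exact_mod_cast i2)
  have i0 := pvInv_stage g rows cols 0 _ (by omega) (by omega) (by exact_mod_cast i1)
  exact i0

-- ===== VERDICT (by name: the statement is the Claim_ definition above) =====
theorem sum_trailhead_ratings_spec : Claim_equal_sum_trailhead_ratings := by
  intro grid _ _
  unfold Spec_sum_trailhead_ratings sum_trailhead_ratings sum_trailhead_ratings_alt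
  simp only []
  apply PySem.List.foldl_congr_mem
  intro tot r hrmem
  have hr := (PySem.List.mem_pyRange_one).mp hrmem
  apply PySem.List.foldl_congr_mem
  intro tot c hcmem
  have hc := (PySem.List.mem_pyRange_one).mp hcmem
  by_cases hz : pvGv grid r c = 0
  · rw [if_pos hz, if_pos hz]
    have hf := pvInv_final grid (grid.length : Int) ((PySem.List.pyGetD grid 0 []).length : Int) rfl rfl
      r c hr.1 hr.2 hc.1 hc.2
    have h10 : ((10:Int) - pvGv grid r c).toNat = 10 := by omega
    rw [hf, if_pos (by omega), h10]
  · rw [if_neg hz, if_neg hz]
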